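-- pv_equiv track=rewrite | github.com/RealPapaya/CodeViz | analyze_bios.py | mask_string_literals
-- ===== SOURCE A (Python) =====
-- def mask_string_literals(src: str) -> str:
--     out = []
--     i, n = 0, len(src)
--     while i < n:
--         ch = src[i]
--         if ch in ('"', "'"):
--             q = ch
--             out.append(' ')
--             i += 1
--             while i < n:
--                 c = src[i]
--                 if c == '\\':
--                     out.append(' ')
--                     i += 1
--                     if i < n:
--                         out.append(' ')
--                         i += 1
--                     continue
--                 out.append(' ')
--                 i += 1
--                 if c == q:
--                     break
--         else:
--             out.append(ch)
--             i += 1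
--     return ''.join(out)
-- ===== SOURCE B (Python) =====
-- def mask_string_literals(src: str) -> str:
--     out = []
--     quote = None
--     escaped = False
--     for ch in src:
--         if quote is None:
--             if ch in ('"', "'"):
--                 quote = ch
--                 out.append(' ')
--             else:
--                 out.append(ch)
--         elif escaped:
--             out.append(' ')
--             escaped = False
--         elif ch == '\\':
--             out.append(' ')
--             escaped = True
--         else:
--             out.append(' ')
--             if ch == quote:
--                 quote = None
--     return ''.join(out)
-- ===== Notes on version B (the rewrite author's own statement) =====
-- stated objective: simpler
-- what changed: Replaced the nested inner while-loop with manual index arithmetic by a single flat pass over the characters maintaining a quote/escaped state machine.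
import Mathlib
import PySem

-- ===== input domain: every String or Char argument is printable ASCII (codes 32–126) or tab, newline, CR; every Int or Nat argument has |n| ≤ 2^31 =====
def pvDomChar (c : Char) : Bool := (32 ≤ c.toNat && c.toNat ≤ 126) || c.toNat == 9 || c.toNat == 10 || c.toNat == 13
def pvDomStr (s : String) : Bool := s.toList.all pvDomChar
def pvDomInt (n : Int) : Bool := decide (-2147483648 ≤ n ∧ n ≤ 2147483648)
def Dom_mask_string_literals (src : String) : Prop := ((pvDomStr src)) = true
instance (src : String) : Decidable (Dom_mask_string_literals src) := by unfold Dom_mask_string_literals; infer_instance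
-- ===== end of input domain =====

-- B replaces A's nested inner while-loop and index arithmetic by one flat pass with a quote/escaped state machine (simpler decomposition, same O(n) cost).


-- ===== PORT A =====
-- A's outer while-loop / inner while-loop pair, as mutual structural recursion over the
-- character list (the index i advancing over src is the list being consumed).
mutual
def pvAOuter : List Char → List Char
  | [] => []
  | ch :: rest =>
    if ch = '"' ∨ ch = '\'' then ' ' :: pvAInner ch rest
    else ch :: pvAOuter rest
def pvAInner (q : Char) : List Char → List Char
  | [] => []
  | c :: rest =>
    if c = '\\' then
      match rest with
      | [] => [' ']                                   -- backslash at EOF: one space, loop ends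
      | _ :: rest' => ' ' :: ' ' :: pvAInner q rest'  -- emit two spaces, skip escaped char
    else if c = q then ' ' :: pvAOuter rest           -- closing quote: break to outer loop
    else ' ' :: pvAInner q rest
end

def mask_string_literals (src : String) : String := String.mk (pvAOuter src.toList)

-- ===== PORT B =====
-- B's single for-loop with state (quote : Option Char, escaped : Bool).
def pvBGo (quote : Option Char) (escaped : Bool) : List Char → List Char
  | [] => []
  | ch :: rest =>
    match quote with
    | none =>
      if ch = '"' ∨ ch = '\'' then ' ' :: pvBGo (some ch) false rest
      else ch :: pvBGo none false rest
    | some q =>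
      if escaped then ' ' :: pvBGo (some q) false rest
      else if ch = '\\' then ' ' :: pvBGo (some q) true rest
      else ' ' :: pvBGo (if ch = q then none else some q) false rest

def mask_string_literals_alt (src : String) : String := String.mk (pvBGo none false src.toList)

-- ===== PRECONDITION & SPEC =====
def Spec_mask_string_literals (src : String) (out : String) : Prop := out = mask_string_literals_alt src
instance (src : String) (out : String) : Decidable (Spec_mask_string_literals src out) := by unfold Spec_mask_string_literals; infer_instance

-- ===== CLAIM (what is proved, stated in full; the proofs are below) =====
def Claim_equal_mask_string_literals : Prop := ∀ (src : String), Dom_mask_string_literals src → Spec_mask_string_literals src (mask_string_literals src)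

-- ===== LEMMAS AND PROOFS =====

-- Core invariant: A's outer loop matches B's state (none, false), and A's inner loop
-- with quote q matches B's state (some q, false); proved by strong induction on length.
theorem pv_outer_inner_eq :
    ∀ n (l : List Char), l.length ≤ n →
      (pvAOuter l = pvBGo none false l ∧ ∀ q, pvAInner q l = pvBGo (some q) false l) := by
  intro n
  induction n with
  | zero =>
    intro l hl
    have : l = [] := List.eq_nil_of_length_eq_zero (Nat.le_zero.mp hl)
    subst this
    exact ⟨rfl, fun _ => rfl⟩
  | succ n ih =>
    intro l hl
    match l with
    | [] => exact ⟨rfl, fun _ => rfl⟩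
    | ch :: rest =>
      have hr : rest.length ≤ n := by simpa using Nat.lt_succ_iff.mp (by simpa using hl)
      constructor
      · -- outer loops agree
        rw [pvAOuter.eq_def, pvBGo.eq_def]
        dsimp only
        by_cases hq : ch = '"' ∨ ch = '\''
        · rw [if_pos hq, if_pos hq, (ih rest hr).2 ch]
        · rw [if_neg hq, if_neg hq, (ih rest hr).1]
      · -- inner loops agree
        intro q
        rw [pvAInner.eq_def, pvBGo.eq_def]
        dsimp only
        simp only [Bool.false_eq_true, if_false]
        by_cases hb : ch = '\\'
        · rw [if_pos hb, if_pos hb]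
          cases rest with
          | nil => rfl
          | cons x rest' =>
            have hr' : rest'.length ≤ n := by
              simp only [List.length_cons] at hl; omega
            dsimp only
            rw [pvBGo.eq_def]
            dsimp only
            rw [if_pos rfl, (ih rest' hr').2 q]
        · rw [if_neg hb, if_neg hb]
          by_cases hq : ch = q
          · rw [if_pos hq, if_pos hq, (ih rest hr).1]
          · rw [if_neg hq, if_neg hq, (ih rest hr).2 q]

-- ===== VERDICT (by name: the statement is the Claim_ definition above) =====
theorem mask_string_literals_spec : Claim_equal_mask_string_literals := by
  intro src _
  unfold Spec_mask_string_literals mask_string_literals mask_string_literals_alt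
  exact congrArg _ (pv_outer_inner_eq src.toList.length src.toList le_rfl).1
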